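-- pv_equiv track=rewrite | github.com/daniel-reich/ubiquitous-fiesta | hv572GaPtbqwhJpTb_11.py | elasticize
-- ===== SOURCE A (Python) =====
-- def elasticize(word):
--     if len(word)%2==0:
--         n=len(word)//2
--         x=[(i+1)*word[i] for i in range(n)]
--         y=[(n-i)*word[n:][i] for i in range(n)]
--         return ''.join(x+y)
--     else:
--         n=len(word)//2
--         x=[(i+1)*word[i] for i in range(n)]
--         y=[(n-i)*word[n+1:][i] for i in range(n)]
--         return ''.join(x+[word[n]*(n+1)]+y)
-- ===== SOURCE B (Python) =====
-- def elasticize(word):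
--     return ''.join(c * min(i + 1, len(word) - i) for i, c in enumerate(word))
-- ===== Notes on version B (the rewrite author's own statement) =====
-- stated objective: simpler
-- what changed: Replaces the even/odd half-splitting with slices and a separate middle case by a single enumerate pass using the closed-form multiplier min(i+1, len(word)-i).
import Mathlib
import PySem

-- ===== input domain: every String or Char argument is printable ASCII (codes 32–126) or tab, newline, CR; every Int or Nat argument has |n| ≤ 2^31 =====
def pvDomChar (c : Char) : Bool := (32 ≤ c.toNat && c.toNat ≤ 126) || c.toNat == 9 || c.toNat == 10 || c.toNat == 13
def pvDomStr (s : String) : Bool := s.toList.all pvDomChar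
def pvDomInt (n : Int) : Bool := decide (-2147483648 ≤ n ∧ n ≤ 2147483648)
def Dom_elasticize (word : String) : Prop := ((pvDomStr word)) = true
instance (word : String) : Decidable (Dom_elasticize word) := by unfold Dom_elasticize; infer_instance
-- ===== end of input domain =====

-- B replaces A's even/odd half-splitting (slices + middle case) with one enumerate pass
-- using the closed-form multiplier min(i+1, len(word)-i); objective: simpler.

-- ===== PORT A =====
-- ''.join over lists of characters is List.flatten (exact: the separator is empty).
def elasticize (word : String) : String :=
  let s := word.toList
  if s.length % 2 = 0 then
    let n := s.length / 2
    let x := (List.range n).map (fun i => List.replicate (i + 1) (PySem.List.pyGetD s (i : Int) ' '))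
    let y := (List.range n).map (fun i =>
      List.replicate (n - i) (PySem.List.pyGetD (PySem.List.slice s (some (n : Int)) none) (i : Int) ' '))
    String.ofList ((x ++ y).flatten)
  else
    let n := s.length / 2
    let x := (List.range n).map (fun i => List.replicate (i + 1) (PySem.List.pyGetD s (i : Int) ' '))
    let y := (List.range n).map (fun i =>
      List.replicate (n - i) (PySem.List.pyGetD (PySem.List.slice s (some ((n : Int) + 1)) none) (i : Int) ' '))
    String.ofList ((x ++ [List.replicate (n + 1) (PySem.List.pyGetD s (n : Int) ' ')] ++ y).flatten)

-- ===== PORT B =====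
-- ''.join over the generator is the flatMap of the per-character repetitions (exact).
def elasticize_alt (word : String) : String :=
  let s := word.toList
  String.ofList ((PySem.List.enumerate s).flatMap
    (fun p => List.replicate (min (p.1 + 1) ((s.length : Int) - p.1)).toNat p.2))

-- ===== PRECONDITION & SPEC =====
def Spec_elasticize (word : String) (out : String) : Prop := out = elasticize_alt word
instance (word : String) (out : String) : Decidable (Spec_elasticize word out) := by unfold Spec_elasticize; infer_instance

-- ===== CLAIM (what is proved, stated in full; the proofs are below) =====
def Claim_equal_elasticize : Prop := ∀ (word : String), Dom_elasticize word → Spec_elasticize word (elasticize word)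

-- ===== LEMMAS AND PROOFS =====

-- ===== VERDICT (by name: the statement is the Claim_ definition above) =====
-- canonical form: the multiplier written once per absolute index
def pvCanon (s : List Char) : List Char :=
  ((List.range s.length).map
    (fun i => List.replicate (min (i + 1) (s.length - i)) (s.getD i ' '))).flatten

lemma pvB_eq_canon (s : List Char) :
    (PySem.List.enumerate s).flatMap
      (fun p => List.replicate (min (p.1 + 1) ((s.length : Int) - p.1)).toNat p.2) = pvCanon s := by
  rw [PySem.List.enumerate_eq_map_pyRange s ' ']
  simp only [PySem.List.len, PySem.List.pyRange_zero_natCast, List.map_map, List.flatMap_map,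
    pvCanon, List.flatten_eq_flatMap]
  refine List.flatMap_congr ?_
  intro i hi
  have hiL : i < s.length := List.mem_range.mp hi
  simp only [Function.comp]
  rw [PySem.List.pyGetD_natCast]
  congr 1
  omega

lemma pvA_even (s : List Char) (n : Nat) (h : s.length = n + n) :
    ((List.range n).map (fun i => List.replicate (i + 1) (PySem.List.pyGetD s (i : Int) ' ')) ++
     (List.range n).map (fun i =>
       List.replicate (n - i) (PySem.List.pyGetD (PySem.List.slice s (some (n : Int)) none) (i : Int) ' '))).flatten
    = pvCanon s := by
  unfold pvCanon
  rw [h, List.range_add, List.map_append, List.map_map]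
  congr 1
  congr 1
  · apply List.map_congr_left
    intro i hi
    have hiL : i < n := List.mem_range.mp hi
    rw [PySem.List.pyGetD_natCast]
    congr 1
    omega
  · apply List.map_congr_left
    intro i hi
    have hiL : i < n := List.mem_range.mp hi
    simp only [Function.comp, PySem.List.slice_from_natCast, PySem.List.pyGetD_natCast]
    rw [List.getD_eq_getElem?_getD, List.getD_eq_getElem?_getD, List.getElem?_drop]
    congr 1
    omega

lemma pvA_odd (s : List Char) (n : Nat) (h : s.length = n + 1 + n) :
    ((List.range n).map (fun i => List.replicate (i + 1) (PySem.List.pyGetD s (i : Int) ' ')) ++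
     [List.replicate (n + 1) (PySem.List.pyGetD s (n : Int) ' ')] ++
     (List.range n).map (fun i =>
       List.replicate (n - i) (PySem.List.pyGetD (PySem.List.slice s (some ((n : Int) + 1)) none) (i : Int) ' '))).flatten
    = pvCanon s := by
  unfold pvCanon
  rw [h, List.range_add, List.map_append, List.map_map, List.range_add, List.map_append, List.map_map,
    List.range_one]
  congr 1
  congr 1
  · congr 1
    · apply List.map_congr_left
      intro i hi
      have hiL : i < n := List.mem_range.mp hi
      rw [PySem.List.pyGetD_natCast]
      congr 1
      omega
    · simp only [List.map_cons, List.map_nil, Function.comp, Nat.add_zero]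
      rw [PySem.List.pyGetD_natCast]
      congr 2
      omega
  · apply List.map_congr_left
    intro i hi
    have hiL : i < n := List.mem_range.mp hi
    have hcast : ((n : Int) + 1) = ((n + 1 : Nat) : Int) := by push_cast; ring
    simp only [Function.comp, hcast, PySem.List.slice_from_natCast, PySem.List.pyGetD_natCast]
    rw [List.getD_eq_getElem?_getD, List.getD_eq_getElem?_getD, List.getElem?_drop]
    congr 1
    omega

theorem elasticize_spec : Claim_equal_elasticize := by
  intro word _
  unfold Spec_elasticize elasticize elasticize_alt
  simp only
  rw [pvB_eq_canon]
  by_cases h : word.toList.length % 2 = 0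
  · rw [if_pos h, pvA_even word.toList (word.toList.length / 2) (by omega)]
  · rw [if_neg h, pvA_odd word.toList (word.toList.length / 2) (by omega)]
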